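-- pv_equiv track=rewrite | github.com/theplow-kwak/testcode | python/smart.py | bytes_to_decimal_string
-- ===== SOURCE A (Python) =====
-- def bytes_to_decimal_string(bytes_data):
--     decimal = "0"
--     for byte in reversed(bytes_data):
--         carry = int(byte, base=16)
--         for i in range(len(decimal) - 1, -1, -1):
--             num = (ord(decimal[i]) - ord("0")) * 256 + carry
--             decimal = decimal[:i] + chr(ord("0") + num % 10) + decimal[i + 1 :]
--             carry = num // 10
--         while carry > 0:
--             decimal = chr(ord("0") + carry % 10) + decimal
--             carry //= 10
--     return decimal
-- ===== SOURCE B (Python) =====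
-- def bytes_to_decimal_string(bytes_data):
--     n = 0
--     for byte in reversed(bytes_data):
--         n = n * 256 + int(byte, base=16)
--     return str(n)
-- ===== Notes on version B (the rewrite author's own statement) =====
-- stated objective: faster
-- what changed: Replaces the per-digit decimal-string schoolbook multiply-add (quadratic string slicing per byte) by accumulating the value into one Python big integer and calling str() once.
-- outside the precondition, e.g. on bytes_to_decimal_string(['-1']): A returns '9', B returns '-1'
import Mathlib
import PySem

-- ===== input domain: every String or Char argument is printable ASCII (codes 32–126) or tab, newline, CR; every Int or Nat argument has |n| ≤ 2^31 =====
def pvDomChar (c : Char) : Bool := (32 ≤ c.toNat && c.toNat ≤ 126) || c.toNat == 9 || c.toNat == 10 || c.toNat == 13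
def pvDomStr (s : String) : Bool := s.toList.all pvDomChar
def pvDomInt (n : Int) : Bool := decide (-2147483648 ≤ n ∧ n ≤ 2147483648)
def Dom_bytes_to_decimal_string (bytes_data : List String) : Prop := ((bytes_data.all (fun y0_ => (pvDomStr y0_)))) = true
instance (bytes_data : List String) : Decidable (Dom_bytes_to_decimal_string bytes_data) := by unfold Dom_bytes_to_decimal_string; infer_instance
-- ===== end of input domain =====

-- B replaces A's per-digit decimal-string schoolbook multiply-add by accumulating the value
-- into one big integer and converting to a string once (objective: faster).


-- ===== PORT A =====
-- the 'while carry > 0:' loop of A (prepends decimal digits of carry)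
def pvWhileCarry (decimal : List Char) (carry : Int) : List Char :=
  if _h : 0 < carry then
    pvWhileCarry (Char.ofNat (48 + PySem.Int.mod carry 10).toNat :: decimal)
      (PySem.Int.floordiv carry 10)
  else decimal
  termination_by carry.toNat
  decreasing_by
    rw [PySem.Int.floordiv_eq_ediv_of_pos (by norm_num)]
    omega

def bytes_to_decimal_string (bytes_data : List String) : String :=
  String.ofList (bytes_data.reverse.foldl
    (fun decimal byte =>
      let st := (PySem.List.pyRange ((decimal.length : Int) - 1) (-1) (-1)).foldl
        (fun (st : List Char × Int) i =>
          let num := (((PySem.List.pyGetD st.1 i ' ').toNat : Int) - 48) * 256 + st.2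
          (PySem.List.slice st.1 none (some i) ++
             [Char.ofNat (48 + PySem.Int.mod num 10).toNat] ++
             PySem.List.slice st.1 (some (i + 1)) none,
           PySem.Int.floordiv num 10))
        (decimal, (PySem.Int.ofStrBase? byte 16).getD 0)
      pvWhileCarry st.1 st.2)
    ['0'])

-- ===== PORT B =====
def bytes_to_decimal_string_alt (bytes_data : List String) : String :=
  PySem.Int.toStr (bytes_data.reverse.foldl
    (fun n byte => n * 256 + (PySem.Int.ofStrBase? byte 16).getD 0) 0)

-- ===== PRECONDITION & SPEC =====
-- Pre_ admits exactly the lists whose every element parses under int(_, 16) to a NONNEGATIVE value: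
-- elements that do not parse make both programs raise ValueError, and elements parsing negative are
-- outside the byte domain the function is about (there A's digit loop can silently drop a negative
-- final carry).  '0 ≤ getD (-1)' says precisely 'parses, and to a nonnegative value'.
def Pre_bytes_to_decimal_string (bytes_data : List String) : Prop :=
  ∀ s ∈ bytes_data, 0 ≤ (PySem.Int.ofStrBase? s 16).getD (-1)
instance (bytes_data : List String) : Decidable (Pre_bytes_to_decimal_string bytes_data) := by
  unfold Pre_bytes_to_decimal_string; infer_instance

def pvWitness_bytes_to_decimal_string : List String := ["ff", "01"]

def Spec_bytes_to_decimal_string (bytes_data : List String) (out : String) : Prop := out = bytes_to_decimal_string_alt bytes_data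
instance (bytes_data : List String) (out : String) : Decidable (Spec_bytes_to_decimal_string bytes_data out) := by unfold Spec_bytes_to_decimal_string; infer_instance

-- ===== CLAIM (what is proved, stated in full; the proofs are below) =====
def Claim_equal_bytes_to_decimal_string : Prop := ∀ (bytes_data : List String), Dom_bytes_to_decimal_string bytes_data → Pre_bytes_to_decimal_string bytes_data → Spec_bytes_to_decimal_string bytes_data (bytes_to_decimal_string bytes_data)

-- ===== LEMMAS AND PROOFS =====

-- functional form of A's inner index loop (rightmost digit is processed first)
def pvInner : List Char → Int → List Char × Int
  | [], c => ([], c)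
  | d :: ds, c =>
    let p := pvInner ds c
    let num := ((d.toNat : Int) - 48) * 256 + p.2
    (Char.ofNat (48 + PySem.Int.mod num 10).toNat :: p.1, PySem.Int.floordiv num 10)

-- value of a decimal digit string, most significant digit first
def pvValD : List Char → Nat
  | [] => 0
  | d :: ds => (d.toNat - 48) * 10 ^ ds.length + pvValD ds

def pvDigitsOk (ds : List Char) : Prop := ∀ c ∈ ds, 48 ≤ c.toNat ∧ c.toNat ≤ 57

-- canonical decimal representation (= Nat.toDigits 10)
def pvRep (n : Nat) : List Char :=
  if _h : n < 10 then [Nat.digitChar n]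
  else pvRep (n / 10) ++ [Nat.digitChar (n % 10)]
  termination_by n
  decreasing_by omega

lemma pv_digitChar_eq (k : Nat) (h : k < 10) : Nat.digitChar k = Char.ofNat (48 + k) := by
  interval_cases k <;> rfl

lemma pv_toNat_ofNat (m : Nat) (h : m < 55296) : (Char.ofNat m).toNat = m := by
  rw [Char.toNat_ofNat]
  simp [Nat.isValidChar, h]

lemma pv_toDigitsCore_eq (f : Nat) : ∀ (n : Nat) (ds : List Char), n < 10 ^ f → 1 ≤ f →
    Nat.toDigitsCore 10 f n ds = pvRep n ++ ds := by
  induction f with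
  | zero => omega
  | succ f ih =>
    intro n ds hn _
    rw [Nat.toDigitsCore]
    by_cases h10 : n < 10
    · have hz : n / 10 = 0 := by omega
      rw [if_pos hz]
      conv_rhs => rw [pvRep]
      rw [dif_pos h10]
      have hm : n % 10 = n := by omega
      rw [hm]
      rfl
    · have hne : ¬ n / 10 = 0 := by omega
      rw [if_neg hne]
      rw [ih (n / 10) _ (by
        have : 10 * (n / 10) ≤ n := Nat.mul_div_le n 10
        have := Nat.pow_pos (n := f) (by norm_num : 0 < 10)
        omega) (by
        by_contra hf
        have : f = 0 := by omega
        subst this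
        simp at hn
        omega)]
      conv_rhs => rw [pvRep]
      rw [dif_neg h10]
      simp

lemma pv_toDigits_eq (n : Nat) : Nat.toDigits 10 n = pvRep n := by
  have h : n < 10 ^ (n + 1) := by
    calc n < 2 ^ (n + 1) := Nat.lt_two_pow_self.trans (Nat.pow_lt_pow_succ (by norm_num))
    _ ≤ 10 ^ (n + 1) := Nat.pow_le_pow_left (by norm_num) _
  rw [Nat.toDigits, pv_toDigitsCore_eq (n + 1) n [] h (by omega), List.append_nil]

lemma pv_pvInner_snoc (ds : List Char) (d : Char) (c : Int) :
    pvInner (ds ++ [d]) c =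
      ((pvInner ds (PySem.Int.floordiv (((d.toNat : Int) - 48) * 256 + c) 10)).1 ++
        [Char.ofNat (48 + PySem.Int.mod (((d.toNat : Int) - 48) * 256 + c) 10).toNat],
       (pvInner ds (PySem.Int.floordiv (((d.toNat : Int) - 48) * 256 + c) 10)).2) := by
  induction ds with
  | nil => simp [pvInner]
  | cons e es ih => simp [pvInner, ih]

lemma pv_loop_eq (pre : List Char) : ∀ (ds suf : List Char) (c : Int),
    (PySem.List.pyRange ((pre.length : Int) + ds.length - 1) ((pre.length : Int) - 1) (-1)).foldl
      (fun (st : List Char × Int) i =>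
        let num := (((PySem.List.pyGetD st.1 i ' ').toNat : Int) - 48) * 256 + st.2
        (PySem.List.slice st.1 none (some i) ++
           [Char.ofNat (48 + PySem.Int.mod num 10).toNat] ++
           PySem.List.slice st.1 (some (i + 1)) none,
         PySem.Int.floordiv num 10))
      (pre ++ ds ++ suf, c)
    = (pre ++ (pvInner ds c).1 ++ suf, (pvInner ds c).2) := by
  intro ds
  induction ds using List.reverseRecOn with
  | nil =>
    intro suf c
    rw [PySem.List.pyRange_neg_one_eq_nil (by simp)]
    simp [pvInner]
  | append_singleton ds0 d ih =>
    intro suf c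
    have hP : ((pre.length : Int) + ((ds0 ++ [d]).length : Int) - 1)
        = ((pre.length + ds0.length : Nat) : Int) := by
      push_cast [List.length_append, List.length_singleton]
      ring
    rw [hP, PySem.List.pyRange_neg_one_cons (by push_cast; omega)]
    simp only [List.foldl_cons]
    have hget : PySem.List.pyGetD (pre ++ (ds0 ++ [d]) ++ suf) ((pre.length + ds0.length : Nat) : Int) ' ' = d := by
      rw [PySem.List.pyGetD_natCast]
      rw [show pre ++ (ds0 ++ [d]) ++ suf = (pre ++ ds0) ++ ([d] ++ suf) by simp]
      rw [List.getD_append_right _ _ _ _ (by simp)]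
      simp
    have htake : PySem.List.slice (pre ++ (ds0 ++ [d]) ++ suf) none (some ((pre.length + ds0.length : Nat) : Int)) = pre ++ ds0 := by
      rw [PySem.List.slice_to_natCast]
      rw [show pre ++ (ds0 ++ [d]) ++ suf = (pre ++ ds0) ++ ([d] ++ suf) by simp]
      exact List.take_left' (by simp)
    have hdrop : PySem.List.slice (pre ++ (ds0 ++ [d]) ++ suf) (some (((pre.length + ds0.length : Nat) : Int) + 1)) none = suf := by
      rw [show (((pre.length + ds0.length : Nat) : Int) + 1) = ((pre.length + ds0.length + 1 : Nat) : Int) by push_cast; ring]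
      rw [PySem.List.slice_from_natCast]
      rw [show pre ++ (ds0 ++ [d]) ++ suf = (pre ++ ds0 ++ [d]) ++ suf by simp]
      exact List.drop_left' (by simp; omega)
    simp only [hget, htake, hdrop]
    rw [show ((pre.length + ds0.length : Nat) : Int) - 1 = (pre.length : Int) + (ds0.length : Int) - 1 by push_cast; ring]
    rw [show pre ++ ds0 ++ [Char.ofNat (48 + PySem.Int.mod (((d.toNat : Int) - 48) * 256 + c) 10).toNat] ++ suf
        = pre ++ ds0 ++ ([Char.ofNat (48 + PySem.Int.mod (((d.toNat : Int) - 48) * 256 + c) 10).toNat] ++ suf) by simp]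
    rw [ih ([Char.ofNat (48 + PySem.Int.mod (((d.toNat : Int) - 48) * 256 + c) 10).toNat] ++ suf)
        (PySem.Int.floordiv (((d.toNat : Int) - 48) * 256 + c) 10)]
    rw [pv_pvInner_snoc]
    simp

lemma pv_loop_eq0 (ds : List Char) (c : Int) :
    (PySem.List.pyRange ((ds.length : Int) - 1) (-1) (-1)).foldl
      (fun (st : List Char × Int) i =>
        let num := (((PySem.List.pyGetD st.1 i ' ').toNat : Int) - 48) * 256 + st.2
        (PySem.List.slice st.1 none (some i) ++
           [Char.ofNat (48 + PySem.Int.mod num 10).toNat] ++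
           PySem.List.slice st.1 (some (i + 1)) none,
         PySem.Int.floordiv num 10))
      (ds, c)
    = pvInner ds c := by
  have h := pv_loop_eq [] ds [] c
  simpa using h

lemma pv_arith (D v C n : Nat) :
    ((D * 10 ^ n + v) * 256 + C) / 10 ^ (n + 1) = (D * 256 + (v * 256 + C) / 10 ^ n) / 10 ∧
    ((D * 10 ^ n + v) * 256 + C) % 10 ^ (n + 1) =
      ((D * 256 + (v * 256 + C) / 10 ^ n) % 10) * 10 ^ n + (v * 256 + C) % 10 ^ n := by
  set N := v * 256 + C with hN
  set q := N / 10 ^ n with hq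
  set r := N % 10 ^ n with hr
  set M := D * 256 + q with hM
  have hp : 0 < 10 ^ n := Nat.pow_pos (by norm_num)
  have hqr : 10 ^ n * q + r = N := Nat.div_add_mod N (10 ^ n)
  have hrlt : r < 10 ^ n := Nat.mod_lt _ hp
  have hT : (D * 10 ^ n + v) * 256 + C = M * 10 ^ n + r := by
    have : M * 10 ^ n + r = D * 256 * 10 ^ n + (10 ^ n * q + r) := by ring
    rw [this, hqr, hN]
    ring
  constructor
  · rw [hT, pow_succ, ← Nat.div_div_eq_div_mul, mul_comm M (10 ^ n),
      Nat.mul_add_div hp, Nat.div_eq_of_lt hrlt, Nat.add_zero]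
  · have hMdm : 10 * (M / 10) + M % 10 = M := Nat.div_add_mod M 10
    have hsplit : M * 10 ^ n + r = ((M % 10) * 10 ^ n + r) + (10 ^ n * 10) * (M / 10) := by
      nlinarith [hMdm]
    have hslt : (M % 10) * 10 ^ n + r < 10 ^ n * 10 := by
      have h9 : M % 10 < 10 := Nat.mod_lt _ (by norm_num)
      nlinarith
    rw [hT, pow_succ, hsplit, Nat.add_mul_mod_self_left, Nat.mod_eq_of_lt hslt]

lemma pv_pvInner_spec : ∀ (ds : List Char) (c : Int), pvDigitsOk ds → 0 ≤ c →
    (pvInner ds c).2 = ((pvValD ds * 256 + c.toNat) / 10 ^ ds.length : Nat) ∧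
    (pvInner ds c).1.length = ds.length ∧
    pvDigitsOk (pvInner ds c).1 ∧
    pvValD (pvInner ds c).1 = (pvValD ds * 256 + c.toNat) % 10 ^ ds.length := by
  intro ds
  induction ds with
  | nil =>
    intro c hok hc
    refine ⟨by simp [pvInner]; omega, rfl, hok, by simp [pvInner, pvValD, Nat.mod_one]⟩
  | cons d ds ih =>
    intro c hok hc
    have hd := hok d (by simp)
    obtain ⟨h2, hlen, hok', hval⟩ := ih c (fun x hx => hok x (by simp [hx])) hc
    set v := pvValD ds with hv
    set n := ds.length with hn
    set q := (v * 256 + c.toNat) / 10 ^ n with hq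
    set D := d.toNat - 48 with hD
    have hnum : ((d.toNat : Int) - 48) * 256 + (pvInner ds c).2 = ((D * 256 + q : Nat) : Int) := by
      rw [h2]
      omega
    have hmod : PySem.Int.mod ((D * 256 + q : Nat) : Int) 10 = (((D * 256 + q) % 10 : Nat) : Int) :=
      PySem.Int.mod_natCast _ 10
    have hdiv : PySem.Int.floordiv ((D * 256 + q : Nat) : Int) 10 = (((D * 256 + q) / 10 : Nat) : Int) :=
      PySem.Int.floordiv_natCast _ 10
    have hcn : ((48 : Int) + (((D * 256 + q) % 10 : Nat) : Int)).toNat = 48 + (D * 256 + q) % 10 := by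
      omega
    have hctoNat : (Char.ofNat ((48 : Int) + PySem.Int.mod (((d.toNat : Int) - 48) * 256 + (pvInner ds c).2) 10).toNat).toNat
        = 48 + (D * 256 + q) % 10 := by
      rw [hnum, hmod, hcn, pv_toNat_ofNat _ (by omega)]
    have harith := pv_arith D v c.toNat n
    have hvald : pvValD (d :: ds) = D * 10 ^ n + v := by simp [pvValD, hv, hn, hD]
    refine ⟨?_, ?_, ?_, ?_⟩
    · show PySem.Int.floordiv (((d.toNat : Int) - 48) * 256 + (pvInner ds c).2) 10 = _
      rw [hnum, hdiv, hvald]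
      rw [List.length_cons, harith.1]
    · simpa [pvInner] using hlen
    · intro x hx
      simp only [pvInner, List.mem_cons] at hx
      rcases hx with hx | hx
      · subst hx
        rw [hctoNat]
        omega
      · exact hok' x hx
    · have hfst : (pvInner (d :: ds) c).1
          = Char.ofNat ((48 : Int) + PySem.Int.mod (((d.toNat : Int) - 48) * 256 + (pvInner ds c).2) 10).toNat :: (pvInner ds c).1 := rfl
      rw [hfst]
      simp only [pvValD]
      rw [hctoNat, hlen, hval]
      have h48 : 48 + (D * 256 + q) % 10 - 48 = (D * 256 + q) % 10 := by omega
      rw [h48, List.length_cons, ← hD, ← hv, ← hn, harith.2, hq]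

lemma pv_whileCarry_spec (m : Nat) : ∀ (ds : List Char),
    pvWhileCarry ds (m : Int) = (if m = 0 then [] else pvRep m) ++ ds := by
  induction m using Nat.strong_induction_on with
  | _ m ih =>
    intro ds
    rw [pvWhileCarry]
    by_cases hm : m = 0
    · subst hm
      rw [dif_neg (by norm_num)]
      simp
    · rw [dif_pos (by exact_mod_cast Nat.pos_of_ne_zero hm)]
      have hmod : PySem.Int.mod (m : Int) 10 = ((m % 10 : Nat) : Int) := PySem.Int.mod_natCast m 10
      have hdiv : PySem.Int.floordiv (m : Int) 10 = ((m / 10 : Nat) : Int) := PySem.Int.floordiv_natCast m 10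
      rw [hmod, hdiv, ih (m / 10) (by omega)]
      have hchar : Char.ofNat ((48 : Int) + ((m % 10 : Nat) : Int)).toNat = Nat.digitChar (m % 10) := by
        have hn : ((48 : Int) + ((m % 10 : Nat) : Int)).toNat = 48 + m % 10 := by omega
        rw [pv_digitChar_eq _ (by omega), hn]
      rw [hchar]
      by_cases h10 : m < 10
      · have : m / 10 = 0 := by omega
        rw [this, if_pos rfl, if_neg hm]
        conv_rhs => rw [pvRep]
        rw [dif_pos h10]
        have : m % 10 = m := by omega
        rw [this]
        rfl
      · have hd0 : ¬ m / 10 = 0 := by omega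
        rw [if_neg hd0, if_neg hm]
        conv_rhs => rw [pvRep]
        rw [dif_neg h10]
        simp

lemma pv_valD_append (as bs : List Char) :
    pvValD (as ++ bs) = pvValD as * 10 ^ bs.length + pvValD bs := by
  induction as with
  | nil => simp [pvValD]
  | cons d t ih => simp [pvValD, ih, List.length_append, pow_add]; ring

lemma pv_valD_lt (ds : List Char) (h : pvDigitsOk ds) : pvValD ds < 10 ^ ds.length := by
  induction ds with
  | nil => simp [pvValD]
  | cons d t ih =>
    have hd := h d (by simp)
    have ht := ih (fun c hc => h c (by simp [hc]))
    simp only [pvValD, List.length_cons, pow_succ]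
    have h9 : d.toNat - 48 ≤ 9 := by omega
    calc (d.toNat - 48) * 10 ^ t.length + pvValD t
        < (d.toNat - 48) * 10 ^ t.length + 10 ^ t.length := by omega
      _ = (d.toNat - 48 + 1) * 10 ^ t.length := by ring
      _ ≤ 10 * 10 ^ t.length := Nat.mul_le_mul_right _ (by omega)
      _ = 10 ^ t.length * 10 := by ring

lemma pv_digitsOk_append {as bs : List Char} (ha : pvDigitsOk as) (hb : pvDigitsOk bs) :
    pvDigitsOk (as ++ bs) := by
  intro c hc
  rcases List.mem_append.mp hc with h | h
  · exact ha c h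
  · exact hb c h

lemma pv_digitChar_toNat (k : Nat) (h : k < 10) : (Nat.digitChar k).toNat = 48 + k := by
  rw [pv_digitChar_eq k h, pv_toNat_ofNat _ (by omega)]

lemma pv_rep_digitsOk (n : Nat) : pvDigitsOk (pvRep n) := by
  induction n using Nat.strong_induction_on with
  | _ n ih =>
    rw [pvRep]
    by_cases h : n < 10
    · rw [dif_pos h]
      intro c hc
      simp only [List.mem_singleton] at hc
      subst hc
      rw [pv_digitChar_toNat n h]
      omega
    · rw [dif_neg h]
      refine pv_digitsOk_append (ih (n / 10) (by omega)) ?_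
      intro c hc
      simp only [List.mem_singleton] at hc
      subst hc
      rw [pv_digitChar_toNat _ (by omega)]
      omega

lemma pv_valD_singleton (d : Char) : pvValD [d] = d.toNat - 48 := by
  simp [pvValD]

lemma pv_rep_val (n : Nat) : pvValD (pvRep n) = n := by
  induction n using Nat.strong_induction_on with
  | _ n ih =>
    rw [pvRep]
    by_cases h : n < 10
    · rw [dif_pos h, pv_valD_singleton, pv_digitChar_toNat n h]
      omega
    · rw [dif_neg h, pv_valD_append, pv_valD_singleton, ih (n / 10) (by omega),
        pv_digitChar_toNat _ (by omega)]
      simp only [List.length_singleton, pow_one]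
      omega

lemma pv_rep_ne_nil (n : Nat) : pvRep n ≠ [] := by
  rw [pvRep]
  split <;> simp

lemma pv_rep_head (n : Nat) (hn : n ≠ 0) : ∀ d t, pvRep n = d :: t → d ≠ '0' := by
  induction n using Nat.strong_induction_on with
  | _ n ih =>
    intro d t heq
    rw [pvRep] at heq
    by_cases h : n < 10
    · rw [dif_pos h] at heq
      have hd : d = Nat.digitChar n := by
        have := congrArg (fun l => l.headD ' ') heq
        simp at this
        exact this.symm
      subst hd
      rw [pv_digitChar_eq n h]
      intro hc
      have := congrArg Char.toNat hc
      rw [pv_toNat_ofNat _ (by omega)] at this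
      have h0 : ('0' : Char).toNat = 48 := rfl
      omega
    · rw [dif_neg h] at heq
      obtain ⟨e, es, hrep⟩ := List.exists_cons_of_ne_nil (pv_rep_ne_nil (n / 10))
      rw [hrep] at heq
      have hd : d = e := by
        have := congrArg (fun l => l.headD ' ') heq
        simp at this
        exact this.symm
      subst hd
      exact ih (n / 10) (by omega) (by omega) d es hrep

lemma pv_rep_lb (n : Nat) (hn : n ≠ 0) : 10 ^ ((pvRep n).length - 1) ≤ n := by
  induction n using Nat.strong_induction_on with
  | _ n ih =>
    rw [pvRep]
    by_cases h : n < 10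
    · rw [dif_pos h]
      simpa using by omega
    · rw [dif_neg h]
      have hlen : 1 ≤ (pvRep (n / 10)).length :=
        List.length_pos_of_ne_nil (pv_rep_ne_nil (n / 10))
      have hih := ih (n / 10) (by omega) (by omega)
      simp only [List.length_append, List.length_singleton]
      have heq : (pvRep (n / 10)).length + 1 - 1 = ((pvRep (n / 10)).length - 1) + 1 := by omega
      rw [heq, pow_succ]
      calc 10 ^ ((pvRep (n / 10)).length - 1) * 10 ≤ (n / 10) * 10 :=
            Nat.mul_le_mul_right _ hih
        _ ≤ n := by omega

lemma pv_char_eq_of_toNat {c : Char} {k : Nat} (h : c.toNat = k) : c = Char.ofNat k := by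
  rw [← h, Char.ofNat_toNat]

lemma pv_valD_head_pos (e : Char) (t : List Char) (hok : pvDigitsOk (e :: t)) (he : e ≠ '0') :
    0 < pvValD (e :: t) := by
  have hd := hok e (by simp)
  have h48 : e.toNat ≠ 48 := by
    intro hc
    exact he (pv_char_eq_of_toNat hc)
  have hp : 0 < 10 ^ t.length := Nat.pow_pos (by norm_num)
  simp only [pvValD]
  have : 1 ≤ e.toNat - 48 := by omega
  nlinarith

lemma pv_rep_valD : ∀ ds, pvDigitsOk ds → ds ≠ [] →
    (∀ d t, ds = d :: t → d = '0' → t = []) → pvRep (pvValD ds) = ds := by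
  intro ds
  induction ds using List.reverseRecOn with
  | nil => intro _ h; exact absurd rfl h
  | append_singleton ds0 d ih =>
    intro hok _ hhead
    have hdok : 48 ≤ d.toNat ∧ d.toNat ≤ 57 := hok d (by simp)
    have hdchar : Nat.digitChar (d.toNat - 48) = d := by
      rw [pv_digitChar_eq _ (by omega)]
      have : 48 + (d.toNat - 48) = d.toNat := by omega
      rw [this, Char.ofNat_toNat]
    cases ds0 with
    | nil =>
      simp only [List.nil_append]
      rw [pv_valD_singleton, pvRep, dif_pos (by omega), hdchar]
    | cons e t =>
      have hok0 : pvDigitsOk (e :: t) := fun c hc => hok c (by simp at hc ⊢; tauto)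
      have he : e ≠ '0' := by
        intro he0
        have := hhead e (t ++ [d]) (by simp) he0
        simp at this
      have hpos : 0 < pvValD (e :: t) := pv_valD_head_pos e t hok0 he
      rw [pv_valD_append, pv_valD_singleton]
      simp only [List.length_singleton, pow_one]
      set v0 := pvValD (e :: t) with hv0
      have hd10 : d.toNat - 48 < 10 := by omega
      have hge : ¬ v0 * 10 + (d.toNat - 48) < 10 := by omega
      rw [pvRep, dif_neg hge]
      have h1 : (v0 * 10 + (d.toNat - 48)) / 10 = v0 := by omega
      have h2 : (v0 * 10 + (d.toNat - 48)) % 10 = d.toNat - 48 := by omega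
      rw [h1, h2, hdchar]
      rw [ih hok0 (by simp) (by
        intro d' t' heq hd0
        rw [List.cons.injEq] at heq
        exact absurd (heq.1.trans hd0) he)]


lemma pv_main (n C : Nat) :
    pvWhileCarry (pvInner (pvRep n) (C : Int)).1 (pvInner (pvRep n) (C : Int)).2
      = pvRep (n * 256 + C) := by
  have hok := pv_rep_digitsOk n
  obtain ⟨h2, hlen, hok', hvald⟩ := pv_pvInner_spec (pvRep n) (C : Int) hok (Int.natCast_nonneg C)
  rw [pv_rep_val n, Int.toNat_natCast] at h2 hvald
  have hL1 : 1 ≤ (pvRep n).length := List.length_pos_of_ne_nil (pv_rep_ne_nil n)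
  rw [h2, pv_whileCarry_spec ((n * 256 + C) / 10 ^ (pvRep n).length) _]
  set L := (pvRep n).length with hLdef
  set N := n * 256 + C with hNdef
  set q := N / 10 ^ L with hqdef
  set r := N % 10 ^ L with hrdef
  set F := (if q = 0 then [] else pvRep q) ++ (pvInner (pvRep n) (C : Int)).1 with hF
  have hdm : 10 ^ L * q + r = N := Nat.div_add_mod N (10 ^ L)
  have hFok : pvDigitsOk F := by
    rw [hF]
    refine pv_digitsOk_append ?_ hok'
    split
    · intro c hc; simp at hc
    · exact pv_rep_digitsOk q
  have hdsne : (pvInner (pvRep n) (C : Int)).1 ≠ [] := by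
    intro hnil
    rw [hnil] at hlen
    simp at hlen
    omega
  have hFne : F ≠ [] := by
    rw [hF]
    intro hc
    exact hdsne (List.append_eq_nil_iff.mp hc).2
  have hvF : pvValD F = N := by
    rw [hF, pv_valD_append, hlen]
    by_cases h0 : q = 0
    · rw [h0] at hdm
      rw [if_pos h0]
      simp only [pvValD]
      omega
    · rw [if_neg h0, pv_rep_val q, hvald, mul_comm]
      exact hdm
  have hhead : ∀ d t, F = d :: t → d = '0' → t = [] := by
    intro d t heq h0
    by_cases hq0 : q = 0
    · rw [hF, if_pos hq0, List.nil_append] at heq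
      by_contra ht
      have hL2 : t.length + 1 = L := by
        rw [← hlen, heq]
        simp
      have htok : pvDigitsOk t := fun c hc => hok' c (by rw [heq]; simp [hc])
      have hvt : pvValD (pvInner (pvRep n) (C : Int)).1 = pvValD t := by
        rw [heq, h0]
        have h48 : ('0' : Char).toNat = 48 := rfl
        simp [pvValD, h48]
      have hlt : pvValD t < 10 ^ t.length := pv_valD_lt t htok
      rw [hq0] at hdm
      by_cases hn0 : n = 0
      · subst hn0
        have hrep0 : pvRep 0 = ['0'] := by
          rw [pvRep, dif_pos (by norm_num)]
          rfl
        have : L = 1 := by rw [hLdef, hrep0]; rfl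
        exact ht (List.length_eq_zero_iff.mp (by omega))
      · have hlb := pv_rep_lb n hn0
        have hLt : L - 1 = t.length := by omega
        rw [hLt] at hlb
        have hnN : n ≤ N := by rw [hNdef]; omega
        rw [hvald] at hvt
        omega
    · rw [hF, if_neg hq0] at heq
      obtain ⟨e, es, hre⟩ := List.exists_cons_of_ne_nil (pv_rep_ne_nil q)
      rw [hre, List.cons_append, List.cons.injEq] at heq
      exact absurd (heq.1.trans h0) (pv_rep_head q hq0 e es hre)
  have hfin := pv_rep_valD F hFok hFne hhead
  rw [hvF] at hfin
  exact hfin.symm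

lemma pv_outer : ∀ (l : List String),
    (∀ s ∈ l, 0 ≤ (PySem.Int.ofStrBase? s 16).getD (-1)) → ∀ (m : Int), 0 ≤ m →
    (l.foldl
      (fun decimal byte =>
        let st := (PySem.List.pyRange ((decimal.length : Int) - 1) (-1) (-1)).foldl
          (fun (st : List Char × Int) i =>
            let num := (((PySem.List.pyGetD st.1 i ' ').toNat : Int) - 48) * 256 + st.2
            (PySem.List.slice st.1 none (some i) ++
               [Char.ofNat (48 + PySem.Int.mod num 10).toNat] ++
               PySem.List.slice st.1 (some (i + 1)) none,
             PySem.Int.floordiv num 10))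
          (decimal, (PySem.Int.ofStrBase? byte 16).getD 0)
        pvWhileCarry st.1 st.2)
      (pvRep m.toNat)
      = pvRep ((l.foldl (fun n byte => n * 256 + (PySem.Int.ofStrBase? byte 16).getD 0) m).toNat)) ∧
    0 ≤ l.foldl (fun n byte => n * 256 + (PySem.Int.ofStrBase? byte 16).getD 0) m := by
  intro l
  induction l with
  | nil => exact fun _ m hm => ⟨rfl, hm⟩
  | cons s t ih =>
    intro hl m hm
    have hs := hl s (by simp)
    have hv : 0 ≤ (PySem.Int.ofStrBase? s 16).getD 0 := by
      cases hos : PySem.Int.ofStrBase? s 16 with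
      | none => rw [hos] at hs; simp at hs
      | some v => rw [hos] at hs; simpa using hs
    have hm' : 0 ≤ m * 256 + (PySem.Int.ofStrBase? s 16).getD 0 := by positivity
    have hkey : pvWhileCarry
        ((PySem.List.pyRange (((pvRep m.toNat).length : Int) - 1) (-1) (-1)).foldl
          (fun (st : List Char × Int) i =>
            let num := (((PySem.List.pyGetD st.1 i ' ').toNat : Int) - 48) * 256 + st.2
            (PySem.List.slice st.1 none (some i) ++
               [Char.ofNat (48 + PySem.Int.mod num 10).toNat] ++
               PySem.List.slice st.1 (some (i + 1)) none,
             PySem.Int.floordiv num 10))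
          (pvRep m.toNat, (PySem.Int.ofStrBase? s 16).getD 0)).1
        ((PySem.List.pyRange (((pvRep m.toNat).length : Int) - 1) (-1) (-1)).foldl
          (fun (st : List Char × Int) i =>
            let num := (((PySem.List.pyGetD st.1 i ' ').toNat : Int) - 48) * 256 + st.2
            (PySem.List.slice st.1 none (some i) ++
               [Char.ofNat (48 + PySem.Int.mod num 10).toNat] ++
               PySem.List.slice st.1 (some (i + 1)) none,
             PySem.Int.floordiv num 10))
          (pvRep m.toNat, (PySem.Int.ofStrBase? s 16).getD 0)).2
        = pvRep ((m * 256 + (PySem.Int.ofStrBase? s 16).getD 0).toNat) := by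
      rw [pv_loop_eq0 (pvRep m.toNat) ((PySem.Int.ofStrBase? s 16).getD 0)]
      have hvC : (PySem.Int.ofStrBase? s 16).getD 0
          = ((((PySem.Int.ofStrBase? s 16).getD 0).toNat : Nat) : Int) :=
        (Int.toNat_of_nonneg hv).symm
      rw [hvC, pv_main m.toNat ((PySem.Int.ofStrBase? s 16).getD 0).toNat]
      congr 1
      omega
    simp only [List.foldl_cons]
    obtain ⟨ih1, ih2⟩ := ih (fun x hx => hl x (by simp [hx]))
      (m * 256 + (PySem.Int.ofStrBase? s 16).getD 0) hm'
    refine ⟨?_, ih2⟩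
    rw [hkey]
    exact ih1

-- ===== VERDICT (by name: the statement is the Claim_ definition above) =====
theorem bytes_to_decimal_string_spec : Claim_equal_bytes_to_decimal_string := by
  intro bytes_data _ hpre
  unfold Spec_bytes_to_decimal_string bytes_to_decimal_string bytes_to_decimal_string_alt
  have hl : ∀ s ∈ bytes_data.reverse, 0 ≤ (PySem.Int.ofStrBase? s 16).getD (-1) := by
    intro s hs; exact hpre s (List.mem_reverse.mp hs)
  obtain ⟨h1, h2⟩ := pv_outer bytes_data.reverse hl 0 le_rfl
  have h0 : pvRep ((0 : Int).toNat) = ['0'] := by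
    rw [Int.toNat_zero, pvRep, dif_pos (by norm_num)]
    rfl
  rw [h0] at h1
  rw [h1]
  unfold PySem.Int.toStr
  congr 1
  rw [PySem.Int.toChars, if_neg (by omega), pv_toDigits_eq]
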